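-- pv_equiv track=rewrite | github.com/Louw115/neurop-forge | neurop_forge/sources/queue_patterns.py | matches_routing_pattern
-- ===== SOURCE A (Python) =====
-- def matches_routing_pattern(key: str, pattern: str, separator: str, wildcard: str, hash_wildcard: str) -> bool:
--     """Check if routing key matches a pattern."""
--     key_parts = key.split(separator)
--     pattern_parts = pattern.split(separator)
--     key_idx = 0
--     for i, p in enumerate(pattern_parts):
--         if p == hash_wildcard:
--             return True
--         if key_idx >= len(key_parts):
--             return False
--         if p == wildcard:
--             key_idx += 1
--         elif p == key_parts[key_idx]:
--             key_idx += 1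
--         else:
--             return False
--     return key_idx == len(key_parts)
-- ===== SOURCE B (Python) =====
-- def matches_routing_pattern(key: str, pattern: str, separator: str, wildcard: str, hash_wildcard: str) -> bool:
--     """Check if routing key matches a pattern (find the hash cut point, then compare the prefix)."""
--     key_parts = key.split(separator)
--     pattern_parts = pattern.split(separator)
--     if hash_wildcard in pattern_parts:
--         h = pattern_parts.index(hash_wildcard)
--         return h <= len(key_parts) and all(
--             p == wildcard or p == k for p, k in zip(pattern_parts[:h], key_parts))
--     return len(pattern_parts) == len(key_parts) and all(
--         p == wildcard or p == k for p, k in zip(pattern_parts, key_parts))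
-- ===== Notes on version B (the rewrite author's own statement) =====
-- stated objective: simpler
-- what changed: Replaces A's cursor-driven early-return scan over pattern parts with a two-phase structure: locate the first hash-wildcard cut point, then compare the prefix part-wise with zip (or require equal lengths when no hash is present).
import Mathlib
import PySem

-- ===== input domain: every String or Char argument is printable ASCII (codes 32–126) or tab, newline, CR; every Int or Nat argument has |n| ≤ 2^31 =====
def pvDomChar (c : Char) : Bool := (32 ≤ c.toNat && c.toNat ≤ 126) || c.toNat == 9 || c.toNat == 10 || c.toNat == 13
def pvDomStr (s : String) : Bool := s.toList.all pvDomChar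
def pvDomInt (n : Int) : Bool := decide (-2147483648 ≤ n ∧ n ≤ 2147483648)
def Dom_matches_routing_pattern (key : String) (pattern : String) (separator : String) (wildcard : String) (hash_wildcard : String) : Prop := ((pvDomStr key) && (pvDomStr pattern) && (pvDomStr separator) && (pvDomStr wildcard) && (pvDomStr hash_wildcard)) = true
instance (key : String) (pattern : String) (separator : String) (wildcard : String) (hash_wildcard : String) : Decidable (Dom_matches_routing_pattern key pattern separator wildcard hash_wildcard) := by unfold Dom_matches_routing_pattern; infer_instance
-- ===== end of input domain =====

-- B replaces A's cursor-driven early-return scan by "find the hash cut point, then compare the prefix"; objective: simpler.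

-- ===== PORT A =====
-- A's for-loop over pattern_parts with the key_idx cursor, early returns as in the Python.
def pvLoopA (wc hw : String) (kps : List String) (pps : List String) (ki : Nat) : Bool :=
  match pps with
  | [] => ki == kps.length
  | p :: rest =>
    if p == hw then true
    else if kps.length ≤ ki then false
    else if p == wc then pvLoopA wc hw kps rest (ki + 1)
    else if p == kps.getD ki "" then pvLoopA wc hw kps rest (ki + 1)  -- key_parts[key_idx]: ki < length here, getD is exact
    else false

def matches_routing_pattern (key : String) (pattern : String) (separator : String) (wildcard : String) (hash_wildcard : String) : Bool :=
  match PySem.Str.split? key separator, PySem.Str.split? pattern separator with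
  | some kps, some pps => pvLoopA wildcard hash_wildcard kps pps 0
  | _, _ => false  -- split raises ValueError (separator = ""): outside Pre_

-- ===== PORT B =====
-- all(p == wildcard or p == k for p, k in zip(pps, kps))
def pvPrefOk (wc : String) (pps kps : List String) : Bool :=
  (pps.zip kps).all (fun pk => pk.1 == wc || pk.1 == pk.2)

def matches_routing_pattern_alt (key : String) (pattern : String) (separator : String) (wildcard : String) (hash_wildcard : String) : Bool :=
  match PySem.Str.split? key separator with
  | none => false  -- split raises ValueError (separator = ""): outside Pre_
  | some kps =>
    match PySem.Str.split? pattern separator with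
    | none => false
    | some pps =>
      match PySem.List.index? pps hash_wildcard with
      | some h => decide (h ≤ kps.length) && pvPrefOk wildcard (pps.take h) kps
      | none => (pps.length == kps.length) && pvPrefOk wildcard pps kps

-- ===== PRECONDITION & SPEC =====
-- Pre_ excludes only separator = "", on which Python's str.split raises ValueError in both A and B.
def Pre_matches_routing_pattern (key : String) (pattern : String) (separator : String) (wildcard : String) (hash_wildcard : String) : Prop := separator ≠ ""
instance (key : String) (pattern : String) (separator : String) (wildcard : String) (hash_wildcard : String) : Decidable (Pre_matches_routing_pattern key pattern separator wildcard hash_wildcard) := by unfold Pre_matches_routing_pattern; infer_instance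
def pvWitness_matches_routing_pattern : String × String × String × String × String := ("a.b.c", "a.*.#", ".", "*", "#")

def Spec_matches_routing_pattern (key : String) (pattern : String) (separator : String) (wildcard : String) (hash_wildcard : String) (out : Bool) : Prop := out = matches_routing_pattern_alt key pattern separator wildcard hash_wildcard
instance (key : String) (pattern : String) (separator : String) (wildcard : String) (hash_wildcard : String) (out : Bool) : Decidable (Spec_matches_routing_pattern key pattern separator wildcard hash_wildcard out) := by unfold Spec_matches_routing_pattern; infer_instance

-- ===== CLAIM (what is proved, stated in full; the proofs are below) =====
def Claim_equal_matches_routing_pattern : Prop := ∀ (key : String) (pattern : String) (separator : String) (wildcard : String) (hash_wildcard : String), Dom_matches_routing_pattern key pattern separator wildcard hash_wildcard → Pre_matches_routing_pattern key pattern separator wildcard hash_wildcard → Spec_matches_routing_pattern key pattern separator wildcard hash_wildcard (matches_routing_pattern key pattern separator wildcard hash_wildcard)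

-- ===== LEMMAS AND PROOFS =====

theorem pvWitness_ok :
    Dom_matches_routing_pattern pvWitness_matches_routing_pattern.1 pvWitness_matches_routing_pattern.2.1 pvWitness_matches_routing_pattern.2.2.1 pvWitness_matches_routing_pattern.2.2.2.1 pvWitness_matches_routing_pattern.2.2.2.2 ∧
    Pre_matches_routing_pattern pvWitness_matches_routing_pattern.1 pvWitness_matches_routing_pattern.2.1 pvWitness_matches_routing_pattern.2.2.1 pvWitness_matches_routing_pattern.2.2.2.1 pvWitness_matches_routing_pattern.2.2.2.2 := by
  constructor <;> decide

-- The loop invariant: A's cursor scan from position ki computes B's "cut point" formula on kps.drop ki.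
theorem loopA_eq (wc hw : String) (kps : List String) (pps : List String) (ki : Nat)
    (hki : ki ≤ kps.length) :
    pvLoopA wc hw kps pps ki =
      (match PySem.List.index? pps hw with
       | some h => decide (h ≤ kps.length - ki) && pvPrefOk wc (pps.take h) (kps.drop ki)
       | none => (pps.length == kps.length - ki) && pvPrefOk wc pps (kps.drop ki)) := by
  induction pps generalizing ki with
  | nil =>
    simp [pvLoopA, PySem.List.index?, pvPrefOk]
    omega
  | cons p rest ih =>
    by_cases hhw : p = hw
    · subst hhw
      rw [PySem.List.index?_cons_self]
      simp [pvLoopA, pvPrefOk]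
    · have hidx : PySem.List.index? (p :: rest) hw = (PySem.List.index? rest hw).map (· + 1) :=
        PySem.List.index?_cons_of_ne rest hhw
      have hhwb : (p == hw) = false := beq_eq_false_iff_ne.mpr hhw
      by_cases hlen : kps.length ≤ ki
      · have hki' : ki = kps.length := le_antisymm hki hlen
        rw [pvLoopA]
        simp only [hhwb, Bool.false_eq_true, if_false, hlen, if_true, hidx]
        cases hr : PySem.List.index? rest hw with
        | none => simp [pvPrefOk, hki']
        | some h => simp [pvPrefOk, hki']
      · rw [not_le] at hlen
        have hdrop : kps.drop ki = kps[ki] :: kps.drop (ki + 1) :=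
          List.drop_eq_getElem_cons hlen
        have hgetD : kps.getD ki "" = kps[ki] := List.getD_eq_getElem _ _ hlen
        rw [pvLoopA]
        simp only [hhwb, Bool.false_eq_true, if_false, if_neg (not_le.mpr hlen), hgetD]
        by_cases hm : (p == wc || p == kps[ki] : Bool) = true
        · have hrec : (if (p == wc) = true then pvLoopA wc hw kps rest (ki + 1)
              else if (p == kps[ki]) = true then pvLoopA wc hw kps rest (ki + 1) else false)
              = pvLoopA wc hw kps rest (ki + 1) := by
            rcases Bool.or_eq_true_iff.mp hm with h1 | h1 <;> simp [h1]
          rw [hrec, ih (ki + 1) (by omega)]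
          rw [hidx]
          cases hr : PySem.List.index? rest hw with
          | none =>
            simp only [Option.map_none, hdrop, pvPrefOk, List.zip_cons_cons, List.all_cons, hm,
              Bool.true_and, List.length_cons]
            congr 1
            rw [Bool.eq_iff_iff]
            simp only [beq_iff_eq]
            omega
          | some h =>
            simp only [Option.map_some, hdrop, List.take_succ_cons, pvPrefOk,
              List.zip_cons_cons, List.all_cons, hm, Bool.true_and]
            congr 1
            rw [Bool.eq_iff_iff]
            simp only [decide_eq_true_eq]
            omega
        · simp only [Bool.or_eq_true, not_or, Bool.not_eq_true] at hm
          rw [if_neg (by simp [hm.1]), if_neg (by simp [hm.2])]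
          rw [hidx]
          cases hr : PySem.List.index? rest hw with
          | none =>
            simp only [Option.map_none, hdrop, pvPrefOk, List.zip_cons_cons, List.all_cons,
              hm.1, hm.2, Bool.or_self, Bool.false_and, Bool.and_false]
          | some h =>
            simp only [Option.map_some, hdrop, List.take_succ_cons, pvPrefOk,
              List.zip_cons_cons, List.all_cons, hm.1, hm.2, Bool.or_self, Bool.false_and,
              Bool.and_false]

-- ===== VERDICT (by name: the statement is the Claim_ definition above) =====
theorem matches_routing_pattern_spec : Claim_equal_matches_routing_pattern := by
  intro key pattern separator wildcard hash_wildcard _ hpre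
  have hne : separator.toList.isEmpty = false := by
    rw [List.isEmpty_eq_false_iff]
    intro h
    exact hpre (String.toList_eq_nil_iff.mp h)
  unfold Spec_matches_routing_pattern matches_routing_pattern matches_routing_pattern_alt
  simp only [PySem.Str.split?, PySem.Chars.split?, hne, Bool.false_eq_true, if_false,
    Option.map_some]
  exact loopA_eq wildcard hash_wildcard _ _ 0 (Nat.zero_le _)
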